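-- pv_equiv track=rewrite | github.com/cpp-rakesh/code_wars | kata/7kyu/simple_remove_duplicates.py | solve
-- ===== SOURCE A (Python) =====
-- def solve(arr):
--     d = {}
--     r = []
--     for a in reversed(arr):
--         if a not in d:
--             d[a] = 1
--             r.append(a)
--     r.reverse()
--     return r
-- ===== SOURCE B (Python) =====
-- def solve(arr):
--     last = {}
--     for i, a in enumerate(arr):
--         last[a] = i
--     return [a for i, a in enumerate(arr) if last[a] == i]
-- ===== Notes on version B (the rewrite author's own statement) =====
-- stated objective: alternative
-- what changed: Replaces the reversed-pass first-occurrence dedup plus final reverse with two forward passes: one building a last-occurrence index table, one keeping each element exactly at its last index.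
import Mathlib
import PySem

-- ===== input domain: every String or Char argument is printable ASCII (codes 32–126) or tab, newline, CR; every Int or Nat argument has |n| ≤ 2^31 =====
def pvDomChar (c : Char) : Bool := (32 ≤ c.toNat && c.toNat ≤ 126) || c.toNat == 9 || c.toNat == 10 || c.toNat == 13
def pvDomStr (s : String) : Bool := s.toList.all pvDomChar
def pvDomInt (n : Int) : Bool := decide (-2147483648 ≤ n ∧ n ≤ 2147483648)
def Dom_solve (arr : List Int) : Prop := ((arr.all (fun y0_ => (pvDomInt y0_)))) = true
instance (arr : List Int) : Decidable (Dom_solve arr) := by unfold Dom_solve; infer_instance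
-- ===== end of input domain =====

-- B replaces A's reversed first-occurrence dedup pass (plus final reverse) with two
-- forward passes: build a last-occurrence index table, then keep each element at its last index.

-- ===== PORT A =====
-- A: one pass over reversed(arr), keeping first occurrences via a dict, then reverse the result.
def solve (arr : List Int) : List Int :=
  let st := arr.reverse.foldl
    (fun (st : PySem.Dict Int Int × List Int) a =>
      if st.1.contains a = false then (st.1.insert a 1, st.2 ++ [a]) else st)
    (PySem.Dict.empty, [])
  st.2.reverse

-- ===== PORT B =====
-- B: dict of last-occurrence indices, then a forward comprehension keeping a at index i iff last[a] == i.
def solve_alt (arr : List Int) : List Int :=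
  let last := (PySem.List.enumerate arr).foldl
    (fun (d : PySem.Dict Int Int) p => d.insert p.2 p.1) PySem.Dict.empty
  (PySem.List.enumerate arr).foldl
    (fun r p => if last.get? p.2 = some p.1 then r ++ [p.2] else r) []

-- ===== PRECONDITION & SPEC =====
def Spec_solve (arr : List Int) (out : List Int) : Prop := out = solve_alt arr
instance (arr : List Int) (out : List Int) : Decidable (Spec_solve arr out) := by unfold Spec_solve; infer_instance

-- ===== CLAIM (what is proved, stated in full; the proofs are below) =====
def Claim_equal_solve : Prop := ∀ (arr : List Int), Dom_solve arr → Spec_solve arr (solve arr)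

-- ===== LEMMAS AND PROOFS =====

-- reference function: keep each element iff it does not occur later
def gref : List Int → List Int
  | [] => []
  | a :: t => if a ∈ t then gref t else a :: gref t

-- first-occurrence dedup with an explicit seen list (models A's reversed pass)
def fseen : List Int → List Int → List Int
  | [], _ => []
  | a :: t, s => if a ∈ s then fseen t s else a :: fseen t (a :: s)

lemma loopA (xs : List Int) : ∀ (d : PySem.Dict Int Int) (r s : List Int),
    (∀ x : Int, d.contains x = decide (x ∈ s)) →
    (xs.foldl
      (fun (st : PySem.Dict Int Int × List Int) a =>
        if st.1.contains a = false then (st.1.insert a 1, st.2 ++ [a]) else st)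
      (d, r)).2 = r ++ fseen xs s := by
  induction xs with
  | nil => intro d r s _; simp [fseen]
  | cons a t ih =>
    intro d r s hc
    rw [List.foldl_cons]
    by_cases hm : a ∈ s
    · have hca : d.contains a = true := by rw [hc a]; simp [hm]
      rw [show (if (d, r).1.contains a = false then ((d, r).1.insert a 1, (d, r).2 ++ [a])
          else (d, r)) = (d, r) from by simp [hca]]
      simp only [fseen]
      rw [if_pos hm]
      exact ih d r s hc
    · have hca : d.contains a = false := by rw [hc a]; simp [hm]
      rw [show (if (d, r).1.contains a = false then ((d, r).1.insert a 1, (d, r).2 ++ [a])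
          else (d, r)) = (d.insert a 1, r ++ [a]) from by simp [hca]]
      simp only [fseen]
      rw [if_neg hm]
      refine (ih (d.insert a 1) (r ++ [a]) (a :: s) ?_).trans (by simp)
      intro x
      rw [PySem.Dict.contains_insert, hc x]
      by_cases hx : x = a <;> simp [hx]

lemma fseen_append_singleton (xs : List Int) : ∀ (a : Int) (s : List Int),
    fseen (xs ++ [a]) s = fseen xs s ++ (if a ∈ s ∨ a ∈ xs then [] else [a]) := by
  induction xs with
  | nil => intro a s; by_cases h : a ∈ s <;> simp [fseen, h]
  | cons b t ih =>
    intro a s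
    by_cases hb : b ∈ s
    · rw [List.cons_append, fseen, if_pos hb, ih, fseen, if_pos hb]
      congr 1
      by_cases hab : a = b
      · subst hab; simp [hb]
      · simp [hab]
    · rw [List.cons_append, fseen, if_neg hb, ih, fseen, if_neg hb]
      have heq : (a ∈ b :: s ∨ a ∈ t) ↔ (a ∈ s ∨ a ∈ b :: t) := by
        simp only [List.mem_cons]; tauto
      rw [List.cons_append]
      congr 1
      by_cases h : a ∈ b :: s ∨ a ∈ t
      · rw [if_pos h, if_pos (heq.mp h)]
      · rw [if_neg h, if_neg (fun hh => h (heq.mpr hh))]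

lemma fseen_reverse_eq_gref (l : List Int) : (fseen l.reverse []).reverse = gref l := by
  induction l with
  | nil => simp [fseen, gref]
  | cons a t ih =>
    rw [List.reverse_cons, fseen_append_singleton, gref]
    simp only [List.not_mem_nil, false_or, List.mem_reverse]
    rw [List.reverse_append, ih]
    split <;> simp

lemma solve_eq_gref (arr : List Int) : solve arr = gref arr := by
  have h2 : solve arr = ((arr.reverse.foldl
      (fun (st : PySem.Dict Int Int × List Int) a =>
        if st.1.contains a = false then (st.1.insert a 1, st.2 ++ [a]) else st)
      (PySem.Dict.empty, [])).2).reverse := rfl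
  rw [h2, loopA arr.reverse PySem.Dict.empty [] [] (by intro x; simp)]
  simpa using fseen_reverse_eq_gref arr

lemma insLoop_not_mem (t : List Int) : ∀ (s : Int) (d : PySem.Dict Int Int) (x : Int),
    x ∉ t →
    ((PySem.List.enumerate t s).foldl (fun d p => d.insert p.2 p.1) d).get? x = d.get? x := by
  induction t with
  | nil => intro s d x _; simp
  | cons a t ih =>
    intro s d x hx
    rw [PySem.List.enumerate_cons, List.foldl_cons]
    rw [ih (s + 1) _ x (fun h => hx (List.mem_cons_of_mem _ h))]
    exact PySem.Dict.get?_insert_of_ne d s (fun h => hx (by simp [h]))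

lemma insLoop_mem (t : List Int) : ∀ (s : Int) (d : PySem.Dict Int Int) (x : Int),
    x ∈ t → ∃ j : Int,
      ((PySem.List.enumerate t s).foldl (fun d p => d.insert p.2 p.1) d).get? x = some j ∧
      s ≤ j := by
  induction t with
  | nil => intro s d x hx; simp at hx
  | cons a t ih =>
    intro s d x hx
    rw [PySem.List.enumerate_cons, List.foldl_cons]
    by_cases hm : x ∈ t
    · obtain ⟨j, hj, hsj⟩ := ih (s + 1) (d.insert a s) x hm
      exact ⟨j, hj, by omega⟩
    · have hxa : x = a := by
        rcases List.mem_cons.mp hx with h | h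
        · exact h
        · exact absurd h hm
      subst hxa
      refine ⟨s, ?_, le_refl s⟩
      rw [insLoop_not_mem t (s + 1) _ x hm]
      exact PySem.Dict.get?_insert_self d x s

lemma altLoop (t : List Int) : ∀ (s : Int) (d : PySem.Dict Int Int) (r0 : List Int),
    (∀ (x j : Int), d.get? x = some j → j < s) →
    (PySem.List.enumerate t s).foldl
      (fun r p =>
        if ((PySem.List.enumerate t s).foldl (fun d p => d.insert p.2 p.1) d).get? p.2 = some p.1
        then r ++ [p.2] else r)
      r0 = r0 ++ gref t := by
  induction t with
  | nil => intro s d r0 _; simp [gref]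
  | cons a t ih =>
    intro s d r0 hd
    have hd' : ∀ (x j : Int), (d.insert a s).get? x = some j → j < s + 1 := by
      intro x j hx
      by_cases hxa : x = a
      · subst hxa
        rw [PySem.Dict.get?_insert_self d x s] at hx
        have := Option.some.inj hx; omega
      · rw [PySem.Dict.get?_insert_of_ne d s hxa] at hx
        have := hd x j hx; omega
    simp only [PySem.List.enumerate_cons, List.foldl_cons, gref]
    by_cases hm : a ∈ t
    · obtain ⟨j, hj, hsj⟩ := insLoop_mem t (s + 1) (d.insert a s) a hm
      rw [if_neg (by rw [hj]; intro h; have := Option.some.inj h; omega), if_pos hm]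
      exact ih (s + 1) (d.insert a s) r0 hd' 
    · have h0 : ((PySem.List.enumerate t (s + 1)).foldl
          (fun d p => d.insert p.2 p.1) (d.insert a s)).get? a = some s := by
        rw [insLoop_not_mem t (s + 1) (d.insert a s) a hm]
        exact PySem.Dict.get?_insert_self d a s
      rw [if_pos h0, if_neg hm]
      exact (ih (s + 1) (d.insert a s) (r0 ++ [a]) hd').trans (by simp)

lemma solve_alt_eq_gref (arr : List Int) : solve_alt arr = gref arr := by
  have h := altLoop arr 0 PySem.Dict.empty []
    (by intro x j h; simp [PySem.Dict.get?_empty] at h)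
  rw [List.nil_append] at h
  exact h

-- ===== VERDICT (by name: the statement is the Claim_ definition above) =====
theorem solve_spec : Claim_equal_solve := by
  intro arr _
  unfold Spec_solve
  rw [solve_eq_gref, solve_alt_eq_gref]
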